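-- pv_equiv track=rewrite | github.com/jiedi720/GifMaker | function/file_manager.py | get_target_paths
-- ===== SOURCE A (Python) =====
-- def get_target_paths(selected_indices: set, all_paths: list) -> list:
--     """获取目标路径列表
--
--     Args:
--         selected_indices: 选中的索引集合
--         all_paths: 所有路径列表
--
--     Returns:
--         list: 目标路径列表
--     """
--     if selected_indices and len(selected_indices) > 1:
--         target_indices = sorted(list(selected_indices))
--         return [all_paths[i] for i in target_indices if 0 <= i < len(all_paths)]
--     else:
--         if selected_indices:
--             idx = list(selected_indices)[0]
--             if 0 <= idx < len(all_paths):
--                 return [all_paths[idx]]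
--         return []
-- ===== SOURCE B (Python) =====
-- def get_target_paths(selected_indices: set, all_paths: list) -> list:
--     """Single pass over all_paths keeping positions that are selected."""
--     return [p for i, p in enumerate(all_paths) if i in selected_indices]
-- ===== Notes on version B (the rewrite author's own statement) =====
-- stated objective: idiomatic
-- what changed: Instead of branching on the set size, sorting the selected indices and indexing back into the list, B makes one pass over enumerate(all_paths) keeping each path whose position is in the set; ascending enumeration order reproduces the sorted-index order and out-of-range indices drop out automatically.
import Mathlib
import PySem

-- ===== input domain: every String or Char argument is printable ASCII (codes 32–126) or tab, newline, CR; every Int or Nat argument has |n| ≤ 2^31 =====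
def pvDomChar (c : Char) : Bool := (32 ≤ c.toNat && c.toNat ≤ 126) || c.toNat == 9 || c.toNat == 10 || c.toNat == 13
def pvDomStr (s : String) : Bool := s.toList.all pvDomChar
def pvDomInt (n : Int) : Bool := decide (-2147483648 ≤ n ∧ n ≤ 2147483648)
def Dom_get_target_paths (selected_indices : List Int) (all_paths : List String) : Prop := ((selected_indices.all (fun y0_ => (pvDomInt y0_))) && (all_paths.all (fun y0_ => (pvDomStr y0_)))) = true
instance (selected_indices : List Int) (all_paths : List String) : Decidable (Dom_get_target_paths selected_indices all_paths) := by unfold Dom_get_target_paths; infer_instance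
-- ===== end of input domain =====

-- B replaces A's size-branch + sort-and-index-back with a single membership-filtering pass
-- over enumerate(all_paths); idiomatic, same return value (no speed claim).

-- ===== PORT A =====
-- the comprehension guard '0 <= i < len(all_paths)' makes the index in range, so
-- all_paths[i] is pyGetD with a dummy default (exact on the guarded branch)
def get_target_paths (selected_indices : List Int) (all_paths : List String) : List String :=
  if selected_indices ≠ [] ∧ 1 < selected_indices.length then
    let target_indices := PySem.List.sorted selected_indices (fun x => x) false
    target_indices.filterMap (fun i =>
      if 0 ≤ i ∧ i < (all_paths.length : Int) then some (PySem.List.pyGetD all_paths i "") else none)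
  else
    match selected_indices with
    | idx :: _ =>
        if 0 ≤ idx ∧ idx < (all_paths.length : Int) then [PySem.List.pyGetD all_paths idx ""]
        else []
    | [] => []

-- ===== PORT B =====
def get_target_paths_alt (selected_indices : List Int) (all_paths : List String) : List String :=
  (PySem.List.enumerate all_paths).filterMap
    (fun ip => if ip.1 ∈ selected_indices then some ip.2 else none)

-- ===== PRECONDITION & SPEC =====
-- the Python argument selected_indices is a set, so its List representation holds distinct
-- elements (type convention); Pre_ states exactly that and nothing more
def Pre_get_target_paths (selected_indices : List Int) (all_paths : List String) : Prop :=
  selected_indices.Nodup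
instance (selected_indices : List Int) (all_paths : List String) : Decidable (Pre_get_target_paths selected_indices all_paths) := by unfold Pre_get_target_paths; infer_instance

def pvWitness_get_target_paths : List Int × List String := ([2, 0, 5, -1], ["a", "b", "c"])

def Spec_get_target_paths (selected_indices : List Int) (all_paths : List String) (out : List String) : Prop := out = get_target_paths_alt selected_indices all_paths
instance (selected_indices : List Int) (all_paths : List String) (out : List String) : Decidable (Spec_get_target_paths selected_indices all_paths out) := by unfold Spec_get_target_paths; infer_instance

-- ===== CLAIM (what is proved, stated in full; the proofs are below) =====
def Claim_equal_get_target_paths : Prop := ∀ (selected_indices : List Int) (all_paths : List String), Dom_get_target_paths selected_indices all_paths → Pre_get_target_paths selected_indices all_paths → Spec_get_target_paths selected_indices all_paths (get_target_paths selected_indices all_paths)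

-- ===== LEMMAS AND PROOFS =====

-- a guarded-option comprehension is filter-then-map
theorem pv_filterMap_guard {α β : Type} (t : List α) (p : α → Prop) [DecidablePred p] (f : α → β) :
    t.filterMap (fun i => if p i then some (f i) else none)
      = (t.filter (fun i => decide (p i))).map f := by
  induction t with
  | nil => rfl
  | cons x xs ih =>
      by_cases h : p x <;> simp [h, ih]

-- B computed as: map the in-set positions of range(len) through indexing
theorem pv_alt_eq (s : List Int) (paths : List String) :
    get_target_paths_alt s paths
      = ((PySem.List.pyRange 0 (paths.length : Int) 1).filter (fun j => decide (j ∈ s))).map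
          (fun j => PySem.List.pyGetD paths j "") := by
  unfold get_target_paths_alt
  rw [PySem.List.enumerate_eq_map_pyRange paths ""]
  rw [List.filterMap_map]
  simp only [Function.comp_def, PySem.List.len]
  exact pv_filterMap_guard _ (fun j => j ∈ s) (fun j => PySem.List.pyGetD paths j "")

-- both index lists are strictly increasing with the same members, hence equal
theorem pv_idx_eq (s : List Int) (hs : s.Nodup) (n : Nat) :
    (PySem.List.sorted s (fun x => x) false).filter
        (fun i => decide (0 ≤ i ∧ i < (n : Int)))
      = (PySem.List.pyRange 0 (n : Int) 1).filter (fun j => decide (j ∈ s)) := by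
  have hpermS : (PySem.List.sorted s (fun x => x) false).Perm s :=
    PySem.List.sorted_perm s (fun x => x) false
  have hnodupL : (PySem.List.sorted s (fun x => x) false).Nodup := hpermS.nodup_iff.mpr hs
  have hltL : (PySem.List.sorted s (fun x => x) false).Pairwise (· < ·) := by
    have hle := PySem.List.sorted_pairwise s (fun x => x)
    have hne : (PySem.List.sorted s (fun x => x) false).Pairwise (· ≠ ·) := hnodupL
    exact (hle.and hne).imp (fun h => lt_of_le_of_ne h.1 h.2)
  have hltR : (PySem.List.pyRange 0 (n : Int) 1).Pairwise (· < ·) := by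
    rw [PySem.List.pyRange_zero_natCast]
    exact (List.pairwise_lt_range (n := n)).map _ (by intro a b h; exact_mod_cast h)
  have hL := hltL.filter (fun i => decide (0 ≤ i ∧ i < (n : Int)))
  have hR := hltR.filter (fun j => decide (j ∈ s))
  have hmem : ∀ a : Int,
      a ∈ (PySem.List.sorted s (fun x => x) false).filter
            (fun i => decide (0 ≤ i ∧ i < (n : Int)))
        ↔ a ∈ (PySem.List.pyRange 0 (n : Int) 1).filter (fun j => decide (j ∈ s)) := by
    intro a
    simp only [List.mem_filter, PySem.List.mem_sorted, PySem.List.mem_pyRange_one,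
      decide_eq_true_eq]
    tauto
  have hperm := (List.perm_ext_iff_of_nodup (hL.nodup) (hR.nodup)).mpr hmem
  exact List.Perm.eq_of_pairwise (fun a b _ _ h1 h2 => absurd h2 (not_lt.mpr h1.le)) hL hR hperm

-- A's multi-select body equals B for every Nodup index list
theorem pv_main (s : List Int) (hs : s.Nodup) (paths : List String) :
    (PySem.List.sorted s (fun x => x) false).filterMap (fun i =>
        if 0 ≤ i ∧ i < (paths.length : Int) then some (PySem.List.pyGetD paths i "") else none)
      = get_target_paths_alt s paths := by
  rw [pv_filterMap_guard (p := fun i => 0 ≤ i ∧ i < (paths.length : Int))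
        (f := fun i => PySem.List.pyGetD paths i ""),
      pv_idx_eq s hs paths.length, pv_alt_eq]

-- ===== VERDICT (by name: the statement is the Claim_ definition above) =====
theorem get_target_paths_spec : Claim_equal_get_target_paths := by
  intro s paths _ hpre
  unfold Spec_get_target_paths get_target_paths
  split
  · exact pv_main s hpre paths
  · next hbr =>
    match s, hpre with
    | [], _ =>
        rw [← pv_main [] (by simp) paths]
        rfl
    | [x], hpre =>
        rw [← pv_main [x] hpre paths]
        have hx : PySem.List.sorted [x] (fun y => y) false = [x] :=
          PySem.List.sorted_eq_self_of_pairwise _ _ (by simp)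
        rw [hx]
        by_cases h : 0 ≤ x ∧ x < (paths.length : Int) <;>
          simp [h]
    | x :: y :: t, _ => simp at hbr
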